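-- pv_equiv track=rewrite | github.com/AllanKoder/Competitive-Programming-Training | codeforces-practice/1017_div4/d.py | solve
-- ===== SOURCE A (Python) =====
-- def compress(s):
--     output = []
--
--     index = 0
--     while index < len(s):
--         counter = 0
--         char = s[index]
--         while index < len(s) and s[index] == char:
--             counter += 1
--             index += 1
--         output.append((char, counter))
--
--     return output
--
-- def solve(matching, heard):
--
--     ma = (compress(matching))
--     he = (compress(heard))
--
--     if len(ma) != len(he):
--         return False
--
--     for i in range(len(ma)):
--         if ma[i][0] != he[i][0]:
--             return False
--         if he[i][1] > ma[i][1]*2 or he[i][1] < ma[i][1]: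
--             return False
--
--     return True
-- ===== SOURCE B (Python) =====
-- def solve(matching, heard):
--     # heard is correct iff it can be produced by typing the characters of
--     # matching in order, pressing each key either once or twice (a run of
--     # length a then yields between a and 2*a copies).  Simulate that
--     # nondeterministic typing process over heard, keeping the set of
--     # reachable "positions typed so far" states.
--     n = len(matching)
--     fresh = set()   # i chars typed, the i-th keystroke not yet repeated
--     spent = {0}     # i chars typed, repeating the previous keystroke is not allowed
--     for c in heard:
--         both = fresh | spent
--         fresh, spent = (
--             {i + 1 for i in both if i < n and matching[i] == c},
--             {i for i in fresh if matching[i - 1] == c},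
--         )
--     return n in fresh or n in spent
-- ===== Notes on version B (the rewrite author's own statement) =====
-- stated objective: alternative
-- what changed: Instead of run-length-encoding both strings and comparing run lists pairwise with the a<=b<=2a bound, B simulates the nondeterministic 'each key of matching is typed once or twice' process over heard, maintaining the set of reachable typed-prefix positions, and accepts iff the full matching is reachable at the end.
import Mathlib
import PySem

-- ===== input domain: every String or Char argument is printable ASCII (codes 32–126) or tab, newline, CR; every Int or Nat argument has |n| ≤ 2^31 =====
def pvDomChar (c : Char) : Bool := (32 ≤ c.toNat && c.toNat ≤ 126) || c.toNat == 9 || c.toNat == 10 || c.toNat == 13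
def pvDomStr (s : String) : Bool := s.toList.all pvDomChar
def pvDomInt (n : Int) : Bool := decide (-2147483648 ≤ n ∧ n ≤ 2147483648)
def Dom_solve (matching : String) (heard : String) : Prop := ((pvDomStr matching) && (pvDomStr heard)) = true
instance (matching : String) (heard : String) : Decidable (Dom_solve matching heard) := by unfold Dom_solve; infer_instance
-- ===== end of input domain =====

-- B replaces the run-length-encode-and-compare algorithm by a nondeterministic-automaton
-- simulation of the "each key typed once or twice" typing process; return value only.

-- ===== PORT A =====
-- inner while of compress: count of leading chars equal to `char`, and the remaining suffix
def countRun (c : Char) : List Char → Int × List Char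
  | [] => (0, [])
  | x :: xs => if x = c then ((countRun c xs).1 + 1, (countRun c xs).2) else (0, x :: xs)

theorem countRun_len (c : Char) (s : List Char) : (countRun c s).2.length ≤ s.length := by
  induction s with
  | nil => simp [countRun]
  | cons x xs ih =>
    simp only [countRun]
    split
    · exact ih.trans (Nat.le_succ _)
    · simp

def compress : List Char → List (Char × Int)
  | [] => []
  | c :: s => (c, (countRun c s).1 + 1) :: compress (countRun c s).2
termination_by s => s.length
decreasing_by exact Nat.lt_succ_of_le (countRun_len c s)

-- the for-loop over the two equal-length run lists, position by position
def checkPairs : List (Char × Int) → List (Char × Int) → Bool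
  | (cm, nm) :: ms, (ch, nh) :: hs =>
      if cm ≠ ch then false
      else if nh > nm * 2 ∨ nh < nm then false
      else checkPairs ms hs
  | _, _ => true

def solve (matching : String) (heard : String) : Bool :=
  let ma := compress matching.toList
  let he := compress heard.toList
  if ma.length ≠ he.length then false else checkPairs ma he

-- ===== PORT B =====
-- body of B's for-loop: one heard character updates the two state sets
-- (indexing matching[i] / matching[i-1] is always in range in B; pyGetD is the in-range total form)
def bstep (m : List Char) (n : Int) (st : PySem.Set Int × PySem.Set Int) (c : Char) :
    PySem.Set Int × PySem.Set Int :=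
  let both := PySem.Set.union st.1 st.2
  (PySem.Set.ofList ((both.filter (fun i => decide (i < n) && (PySem.List.pyGetD m i ' ' == c))).map (fun i => i + 1)),
   PySem.Set.ofList (st.1.filter (fun i => PySem.List.pyGetD m (i - 1) ' ' == c)))

def solve_alt (matching : String) (heard : String) : Bool :=
  let ml := matching.toList
  let n : Int := ml.length
  let fs := heard.toList.foldl (bstep ml n) (PySem.Set.empty, PySem.Set.ofList [0])
  PySem.Set.contains fs.1 n || PySem.Set.contains fs.2 n

-- ===== PRECONDITION & SPEC =====
def Spec_solve (matching : String) (heard : String) (out : Bool) : Prop := out = solve_alt matching heard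
instance (matching : String) (heard : String) (out : Bool) : Decidable (Spec_solve matching heard out) := by unfold Spec_solve; infer_instance

-- ===== CLAIM (what is proved, stated in full; the proofs are below) =====
def Claim_equal_solve : Prop := ∀ (matching : String) (heard : String), Dom_solve matching heard → Spec_solve matching heard (solve matching heard)

-- ===== LEMMAS AND PROOFS =====

-- ---- A-side: fused run recursion equal to A's compress-then-compare ----
def takeRun (c : Char) : List Char → Int × List Char
  | [] => (0, [])
  | x :: xs => if x = c then ((takeRun c xs).1 + 1, (takeRun c xs).2) else (0, x :: xs)

theorem takeRun_len (c : Char) (s : List Char) : (takeRun c s).2.length ≤ s.length := by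
  induction s with
  | nil => simp [takeRun]
  | cons x xs ih =>
    simp only [takeRun]
    split
    · exact ih.trans (Nat.le_succ _)
    · simp

def go : List Char → List Char → Bool
  | [], [] => true
  | [], _ :: _ => false
  | _ :: _, [] => false
  | cm :: ms, ch :: hs =>
      if cm ≠ ch then false
      else if (takeRun ch hs).1 + 1 > ((takeRun cm ms).1 + 1) * 2
              ∨ (takeRun ch hs).1 + 1 < (takeRun cm ms).1 + 1 then false
      else go (takeRun cm ms).2 (takeRun ch hs).2
termination_by m _ => m.length
decreasing_by exact Nat.lt_succ_of_le (takeRun_len cm ms)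

theorem takeRun_eq_countRun (c : Char) (s : List Char) : takeRun c s = countRun c s := by
  induction s with
  | nil => rfl
  | cons x xs ih => simp only [takeRun, countRun, ih]

theorem go_eq (m h : List Char) :
    go m h = (if (compress m).length ≠ (compress h).length then false
              else checkPairs (compress m) (compress h)) := by
  induction m, h using go.induct with
  | case1 => simp [go, compress, checkPairs]
  | case2 => simp [go, compress]
  | case3 => simp [go, compress]
  | case4 cm ms ch hs hc =>
    rw [go, if_pos hc]
    simp only [compress, List.length_cons]
    split
    · rfl
    · simp [checkPairs, hc]
  | case5 cm ms ch hs hc hb =>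
    rw [go, if_neg hc, if_pos hb]
    simp only [takeRun_eq_countRun] at hb
    simp only [compress, List.length_cons]
    split
    · rfl
    · simp only [checkPairs, if_neg hc]
      rw [if_pos hb]
  | case6 cm ms ch hs hc hb ih =>
    rw [go, if_neg hc, if_neg hb]
    simp only [takeRun_eq_countRun] at hb ih ⊢
    rw [ih]
    simp only [compress, List.length_cons]
    by_cases hl : (compress (countRun cm ms).2).length = (compress (countRun ch hs).2).length
    · simp only [hl, ne_eq, not_true_eq_false, if_false, checkPairs, if_neg hc, if_neg hb]
    · simp [hl]

-- ---- run-length arithmetic ----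
def lead (d : Char) : List Char → Nat
  | [] => 0
  | x :: xs => if x = d then lead d xs + 1 else 0

theorem lead_le (d : Char) (s : List Char) : lead d s ≤ s.length := by
  induction s with
  | nil => simp [lead]
  | cons x xs ih =>
    simp only [lead]
    split
    · simp
      omega
    · simp

theorem getD_of_lt_lead (d : Char) (s : List Char) (t : Nat) (h : t < lead d s) :
    s.getD t ' ' = d := by
  induction s generalizing t with
  | nil => simp [lead] at h
  | cons x xs ih =>
    simp only [lead] at h
    split at h
    · cases t with
      | zero => simpa using ‹x = d›
      | succ t' => simpa using ih t' (by omega)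
    · omega

theorem getD_lead_ne (d : Char) (s : List Char) (h : lead d s < s.length) :
    s.getD (lead d s) ' ' ≠ d := by
  induction s with
  | nil => simp at h
  | cons x xs ih =>
    by_cases hx : x = d
    · simp only [lead, if_pos hx, List.length_cons] at h ⊢
      simpa [List.getD] using ih (by omega)
    · simp [lead, hx, List.getD]

theorem takeRun_fst (c : Char) (s : List Char) : (takeRun c s).1 = (lead c s : Int) := by
  induction s with
  | nil => simp [takeRun, lead]
  | cons x xs ih => simp only [takeRun, lead]; split <;> simp [ih]

theorem takeRun_snd (c : Char) (s : List Char) : (takeRun c s).2 = s.drop (lead c s) := by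
  induction s with
  | nil => simp [takeRun, lead]
  | cons x xs ih => simp only [takeRun, lead]; split <;> simp [ih]

theorem getD_drop (m : List Char) (i t : Nat) :
    (m.drop i).getD t ' ' = m.getD (i + t) ' ' := by
  simp [List.getD_eq_getElem?_getD, List.getElem?_drop]

-- ---- B-side: membership through one step ----
theorem drop_eq_cons (m : List Char) (k : Nat) (hk : k < m.length) :
    m.drop k = m.getD k ' ' :: m.drop (k + 1) := by
  rw [List.drop_eq_getElem_cons hk]
  congr 1
  simp [List.getD_eq_getElem?_getD, List.getElem?_eq_getElem hk]

theorem mem_bstep_fst (m : List Char) (n : Int) (st : PySem.Set Int × PySem.Set Int)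
    (c : Char) (j : Int) :
    j ∈ (bstep m n st c).1 ↔
      ∃ i, (i ∈ st.1 ∨ i ∈ st.2) ∧ i < n ∧ PySem.List.pyGetD m i ' ' = c ∧ j = i + 1 := by
  simp only [bstep, PySem.Set.mem_ofList, List.mem_map, List.mem_filter,
    PySem.Set.mem_union, Bool.and_eq_true, decide_eq_true_eq, beq_iff_eq]
  constructor
  · rintro ⟨i, ⟨hm, hlt, hc⟩, rfl⟩; exact ⟨i, hm, hlt, hc, rfl⟩
  · rintro ⟨i, hm, hlt, hc, rfl⟩; exact ⟨i, ⟨hm, hlt, hc⟩, rfl⟩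

theorem mem_bstep_snd (m : List Char) (n : Int) (st : PySem.Set Int × PySem.Set Int)
    (c : Char) (j : Int) :
    j ∈ (bstep m n st c).2 ↔ j ∈ st.1 ∧ PySem.List.pyGetD m (j - 1) ' ' = c := by
  simp [bstep, PySem.Set.mem_ofList, List.mem_filter]

-- mid-run reachable-state formulas: after the boundary i0, b copies of the run char d
-- have been consumed; t matching characters of the current run were advanced over
def FB (m : List Char) (i0 : Nat) (d : Char) (b : Nat) (j : Int) : Prop :=
  ∃ t : Nat, 1 ≤ t ∧ t ≤ lead d (m.drop i0) ∧ t ≤ b ∧ b + 1 ≤ 2 * t ∧ j = ((i0 + t : Nat) : Int)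

def SB (m : List Char) (i0 : Nat) (d : Char) (b : Nat) (j : Int) : Prop :=
  ∃ t : Nat, 1 ≤ t ∧ t ≤ lead d (m.drop i0) ∧ t + 1 ≤ b ∧ b ≤ 2 * t ∧ j = ((i0 + t : Nat) : Int)

def accepts (m : List Char) (st : PySem.Set Int × PySem.Set Int) : Bool :=
  PySem.Set.contains st.1 (m.length : Int) || PySem.Set.contains st.2 (m.length : Int)

theorem lead_drop_le (d : Char) (m : List Char) (i0 : Nat) :
    lead d (m.drop i0) ≤ m.length - i0 := by
  simpa using lead_le d (m.drop i0)

theorem getD_run (d : Char) (m : List Char) (i0 t : Nat) (ht : t < lead d (m.drop i0)) :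
    m.getD (i0 + t) ' ' = d := by
  rw [← getD_drop]; exact getD_of_lt_lead d _ t ht

theorem getD_at_lead_ne (d : Char) (m : List Char) (i0 : Nat)
    (hlt : i0 + lead d (m.drop i0) < m.length) :
    m.getD (i0 + lead d (m.drop i0)) ' ' ≠ d := by
  rw [← getD_drop]
  exact getD_lead_ne d _ (by simp only [List.length_drop]; omega)

theorem go_nil (s : List Char) : go s [] = decide (s = []) := by
  cases s <;> simp [go]

theorem go_nil_cons (c : Char) (h' : List Char) : go [] (c :: h') = false := by
  simp [go]

theorem dead_accept (m : List Char) : ∀ (h : List Char) (st : PySem.Set Int × PySem.Set Int),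
    (∀ j, j ∉ st.1) → (∀ j, j ∉ st.2) →
    accepts m (h.foldl (bstep m (m.length : Int)) st) = false := by
  intro h
  induction h with
  | nil =>
    intro st hF hS
    simp only [List.foldl_nil, accepts, Bool.or_eq_false_iff]
    refine ⟨?_, ?_⟩
    · exact Bool.eq_false_iff.mpr fun hc => hF _ ((PySem.Set.contains_iff _ _).mp hc)
    · exact Bool.eq_false_iff.mpr fun hc => hS _ ((PySem.Set.contains_iff _ _).mp hc)
  | cons c h' ih =>
    intro st hF hS
    rw [List.foldl_cons]
    apply ih
    · intro j hj
      rcases (mem_bstep_fst m _ st c j).1 hj with ⟨i, hm | hm, -⟩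
      · exact hF i hm
      · exact hS i hm
    · intro j hj
      exact hF j ((mem_bstep_snd m (m.length : Int) st c j).1 hj).1

theorem union_formula (m : List Char) (i0 : Nat) (d : Char) (b : Nat) (F S : PySem.Set Int)
    (hb : 1 ≤ b)
    (hF : ∀ j, j ∈ F ↔ FB m i0 d b j) (hS : ∀ j, j ∈ S ↔ SB m i0 d b j) (i : Int) :
    (i ∈ F ∨ i ∈ S) ↔
      ∃ t : Nat, 1 ≤ t ∧ t ≤ lead d (m.drop i0) ∧ t ≤ b ∧ b ≤ 2 * t ∧ i = ((i0 + t : Nat) : Int) := by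
  rw [hF, hS]
  constructor
  · rintro (⟨t, h1, h2, h3, h4, h5⟩ | ⟨t, h1, h2, h3, h4, h5⟩) <;>
      exact ⟨t, h1, h2, by omega, by omega, h5⟩
  · rintro ⟨t, h1, h2, h3, h4, rfl⟩
    by_cases hbb : b + 1 ≤ 2 * t
    · exact Or.inl ⟨t, h1, h2, h3, hbb, rfl⟩
    · exact Or.inr ⟨t, h1, h2, by omega, by omega, rfl⟩

theorem step_formula (m : List Char) (i0 : Nat) (d : Char) (b : Nat)
    (st : PySem.Set Int × PySem.Set Int) (hb : 1 ≤ b)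
    (hF : ∀ j, j ∈ st.1 ↔ FB m i0 d b j) (hS : ∀ j, j ∈ st.2 ↔ SB m i0 d b j) :
    (∀ j, j ∈ (bstep m (m.length : Int) st d).1 ↔ FB m i0 d (b + 1) j) ∧
    (∀ j, j ∈ (bstep m (m.length : Int) st d).2 ↔ SB m i0 d (b + 1) j) := by
  have ha_le : lead d (m.drop i0) ≤ m.length - i0 := lead_drop_le d m i0
  constructor
  · intro j
    rw [mem_bstep_fst]
    constructor
    · rintro ⟨i, hm, hlt, hgc, rfl⟩
      rcases (union_formula m i0 d b st.1 st.2 hb hF hS i).1 hm with ⟨t, h1, h2, h3, h4, rfl⟩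
      have hlt' : i0 + t < m.length := by exact_mod_cast hlt
      have hgc' : m.getD (i0 + t) ' ' = d := by
        rw [← PySem.List.pyGetD_natCast (d := ' ')]; exact hgc
      have htlead : t < lead d (m.drop i0) := by
        rcases Nat.lt_or_ge t (lead d (m.drop i0)) with hlt2 | hge
        · exact hlt2
        · exfalso
          have hta : t = lead d (m.drop i0) := le_antisymm h2 hge
          exact getD_at_lead_ne d m i0 (by omega) (by rw [← hta]; exact hgc')
      exact ⟨t + 1, by omega, by omega, by omega, by omega, by push_cast; ring⟩
    · rintro ⟨u, h1, h2, h3, h4, rfl⟩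
      have hu2 : 2 ≤ u := by omega
      refine ⟨((i0 + (u - 1) : Nat) : Int), ?_, ?_, ?_, by push_cast; omega⟩
      · exact (union_formula m i0 d b st.1 st.2 hb hF hS _).2
          ⟨u - 1, by omega, by omega, by omega, by omega, rfl⟩
      · exact_mod_cast Int.ofNat_lt.mpr (show i0 + (u - 1) < m.length by omega)
      · rw [PySem.List.pyGetD_natCast]
        exact getD_run d m i0 (u - 1) (by omega)
  · intro j
    rw [mem_bstep_snd]
    constructor
    · rintro ⟨hjF, -⟩
      rcases (hF j).1 hjF with ⟨t, h1, h2, h3, h4, h5⟩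
      exact ⟨t, h1, h2, by omega, by omega, h5⟩
    · rintro ⟨t, h1, h2, h3, h4, rfl⟩
      refine ⟨(hF _).2 ⟨t, h1, h2, by omega, by omega, rfl⟩, ?_⟩
      have h5 : ((i0 + t : Nat) : Int) - 1 = ((i0 + (t - 1) : Nat) : Int) := by push_cast; omega
      rw [h5, PySem.List.pyGetD_natCast]
      exact getD_run d m i0 (t - 1) (by omega)

theorem go_cons (m : List Char) (i0 : Nat) (c : Char) (h' : List Char)
    (hlt : i0 < m.length) (hc : m.getD i0 ' ' = c) :
    go (m.drop i0) (c :: h') =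
      (decide (lead c (m.drop i0) ≤ 1 + lead c h' ∧ 1 + lead c h' ≤ 2 * lead c (m.drop i0)) &&
        go (m.drop (i0 + lead c (m.drop i0))) (h'.drop (lead c h'))) := by
  have hdrop : m.drop i0 = c :: m.drop (i0 + 1) := by rw [drop_eq_cons m i0 hlt, hc]
  have hlead : lead c (m.drop i0) = lead c (m.drop (i0 + 1)) + 1 := by
    rw [hdrop]; simp [lead]
  rw [hlead, hdrop, go, if_neg (by simp)]
  rw [takeRun_fst, takeRun_fst, takeRun_snd, takeRun_snd, List.drop_drop]
  rw [show i0 + 1 + lead c (m.drop (i0 + 1)) = i0 + (lead c (m.drop (i0 + 1)) + 1) from by omega]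
  by_cases hcond : lead c (m.drop (i0 + 1)) + 1 ≤ 1 + lead c h' ∧
      1 + lead c h' ≤ 2 * (lead c (m.drop (i0 + 1)) + 1)
  · rw [if_neg (by omega), decide_eq_true hcond, Bool.true_and]
  · rw [if_pos (by omega), decide_eq_false hcond, Bool.false_and]

theorem run_accept (m : List Char) : ∀ (h : List Char) (i0 : Nat) (d : Char) (b : Nat)
    (st : PySem.Set Int × PySem.Set Int), 1 ≤ b →
    (∀ j, j ∈ st.1 ↔ FB m i0 d b j) → (∀ j, j ∈ st.2 ↔ SB m i0 d b j) →
    accepts m (h.foldl (bstep m (m.length : Int)) st) =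
      (decide (lead d (m.drop i0) ≤ b + lead d h ∧ b + lead d h ≤ 2 * lead d (m.drop i0)) &&
        go (m.drop (i0 + lead d (m.drop i0))) (h.drop (lead d h))) := by
  intro h
  induction h with
  | nil =>
    intro i0 d b st hb hF hS
    have ha_le : lead d (m.drop i0) ≤ m.length - i0 := lead_drop_le d m i0
    have hnil : lead d ([] : List Char) = 0 := rfl
    simp only [List.foldl_nil, hnil, Nat.add_zero, List.drop_nil]
    rw [go_nil, ← Bool.decide_and, Bool.eq_iff_iff, decide_eq_true_eq]
    rw [show accepts m st = true ↔
        (((m.length : Nat) : Int) ∈ st.1 ∨ ((m.length : Nat) : Int) ∈ st.2) from by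
      simp [accepts]]
    rw [union_formula m i0 d b st.1 st.2 hb hF hS, List.drop_eq_nil_iff]
    constructor
    · rintro ⟨t, h1, h2, h3, h4, ht⟩
      have hlen : m.length = i0 + t := by exact_mod_cast ht
      exact ⟨⟨by omega, by omega⟩, by omega⟩
    · rintro ⟨⟨hab, hba⟩, hlen⟩
      refine ⟨lead d (m.drop i0), by omega, le_refl _, hab, hba, ?_⟩
      have : m.length = i0 + lead d (m.drop i0) := by omega
      exact_mod_cast this
  | cons c h' ih =>
    intro i0 d b st hb hF hS
    have ha_le : lead d (m.drop i0) ≤ m.length - i0 := lead_drop_le d m i0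
    rw [List.foldl_cons]
    by_cases hcd : c = d
    · subst hcd
      obtain ⟨hF', hS'⟩ := step_formula m i0 c b st hb hF hS
      rw [ih i0 c (b + 1) _ (by omega) hF' hS']
      have hl : lead c (c :: h') = lead c h' + 1 := by simp [lead]
      rw [hl, List.drop_succ_cons,
        show b + (lead c h' + 1) = b + 1 + lead c h' from by omega]
    · have hl0 : lead d (c :: h') = 0 := by simp [lead, hcd]
      rw [hl0, Nat.add_zero, List.drop_zero]
      have hS1 : ∀ j, j ∉ (bstep m (m.length : Int) st c).2 := by
        intro j hj
        rcases (mem_bstep_snd m (m.length : Int) st c j).1 hj with ⟨hjF, hgc⟩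
        rcases (hF j).1 hjF with ⟨t, h1, h2, h3, h4, rfl⟩
        rw [show ((i0 + t : Nat) : Int) - 1 = ((i0 + (t - 1) : Nat) : Int) from by push_cast; omega,
          PySem.List.pyGetD_natCast] at hgc
        exact hcd (hgc.symm.trans (getD_run d m i0 (t - 1) (by omega)))
      by_cases hlive : i0 + lead d (m.drop i0) < m.length ∧
          m.getD (i0 + lead d (m.drop i0)) ' ' = c ∧
          lead d (m.drop i0) ≤ b ∧ b ≤ 2 * lead d (m.drop i0)
      · obtain ⟨hilen, hgc, hab, hba⟩ := hlive
        have ha1 : 1 ≤ lead d (m.drop i0) := by omega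
        have ha' : 1 ≤ lead c (m.drop (i0 + lead d (m.drop i0))) := by
          rw [drop_eq_cons m _ hilen, hgc]; simp [lead]
        have hF1 : ∀ j, j ∈ (bstep m (m.length : Int) st c).1 ↔
            FB m (i0 + lead d (m.drop i0)) c 1 j := by
          intro j
          rw [mem_bstep_fst]
          constructor
          · rintro ⟨i, hm, hilt, hgci, rfl⟩
            rcases (union_formula m i0 d b st.1 st.2 hb hF hS i).1 hm with ⟨t, h1, h2, h3, h4, rfl⟩
            rw [PySem.List.pyGetD_natCast] at hgci
            have hteq : t = lead d (m.drop i0) := by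
              rcases Nat.lt_or_ge t (lead d (m.drop i0)) with hlt2 | hge
              · exact absurd (hgci.symm.trans (getD_run d m i0 t hlt2)) hcd
              · omega
            subst hteq
            exact ⟨1, le_refl _, ha', le_refl _, by omega, by push_cast; omega⟩
          · rintro ⟨u, h1, h2, h3, h4, rfl⟩
            have hu : u = 1 := by omega
            subst hu
            refine ⟨((i0 + lead d (m.drop i0) : Nat) : Int),
              (union_formula m i0 d b st.1 st.2 hb hF hS _).2
                ⟨lead d (m.drop i0), ha1, le_refl _, hab, hba, rfl⟩,
              by exact_mod_cast Int.ofNat_lt.mpr hilen,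
              by rw [PySem.List.pyGetD_natCast]; exact hgc,
              by push_cast; omega⟩
        have hS1' : ∀ j, j ∈ (bstep m (m.length : Int) st c).2 ↔
            SB m (i0 + lead d (m.drop i0)) c 1 j := by
          intro j
          constructor
          · intro hj; exact absurd hj (hS1 j)
          · rintro ⟨t, h1, h2, h3, h4, -⟩; omega
        have hrhs : decide (lead d (m.drop i0) ≤ b ∧ b ≤ 2 * lead d (m.drop i0)) = true :=
          decide_eq_true ⟨hab, hba⟩
        rw [hrhs, Bool.true_and, ih (i0 + lead d (m.drop i0)) c 1 _ le_rfl hF1 hS1']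
        exact (go_cons m (i0 + lead d (m.drop i0)) c h' hilen hgc).symm
      · have hF1e : ∀ j, j ∉ (bstep m (m.length : Int) st c).1 := by
          intro j hj
          rcases (mem_bstep_fst m (m.length : Int) st c j).1 hj with ⟨i, hm, hilt, hgci, -⟩
          rcases (union_formula m i0 d b st.1 st.2 hb hF hS i).1 hm with ⟨t, h1, h2, h3, h4, rfl⟩
          have hlt' : i0 + t < m.length := by exact_mod_cast hilt
          rw [PySem.List.pyGetD_natCast] at hgci
          have hteq : t = lead d (m.drop i0) := by
            rcases Nat.lt_or_ge t (lead d (m.drop i0)) with hlt2 | hge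
            · exact absurd (hgci.symm.trans (getD_run d m i0 t hlt2)) hcd
            · omega
          exact hlive ⟨by omega, by rw [← hteq]; exact hgci, by omega, by omega⟩
        rw [dead_accept m h' _ hF1e hS1]
        by_cases hPb : lead d (m.drop i0) ≤ b ∧ b ≤ 2 * lead d (m.drop i0)
        · rw [decide_eq_true hPb, Bool.true_and]
          by_cases hlen : i0 + lead d (m.drop i0) < m.length
          · have hgcne : m.getD (i0 + lead d (m.drop i0)) ' ' ≠ c :=
              fun hgc2 => hlive ⟨hlen, hgc2, hPb.1, hPb.2⟩
            rw [drop_eq_cons m _ hlen, go, if_pos hgcne]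
          · rw [List.drop_eq_nil_iff.mpr (by omega), go_nil_cons]
        · rw [decide_eq_false hPb, Bool.false_and]

theorem alt_eq_go (m h : List Char) :
    (PySem.Set.contains ((h.foldl (bstep m (m.length : Int)) (PySem.Set.empty, PySem.Set.ofList [0])).1) (m.length : Int) ||
     PySem.Set.contains ((h.foldl (bstep m (m.length : Int)) (PySem.Set.empty, PySem.Set.ofList [0])).2) (m.length : Int)) =
    go m h := by
  show accepts m (h.foldl (bstep m (m.length : Int)) (PySem.Set.empty, PySem.Set.ofList [0])) = go m h
  cases h with
  | nil =>
    simp only [List.foldl_nil]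
    rw [go_nil, Bool.eq_iff_iff, decide_eq_true_eq]
    rw [show accepts m (PySem.Set.empty, PySem.Set.ofList [0]) = true ↔
        (((m.length : Nat) : Int) ∈ (PySem.Set.empty : PySem.Set Int) ∨
         ((m.length : Nat) : Int) ∈ PySem.Set.ofList [(0 : Int)]) from by
      simp [accepts]]
    rw [PySem.Set.mem_ofList]
    simp [PySem.Set.empty, List.length_eq_zero_iff]
  | cons c h' =>
    rw [List.foldl_cons]
    by_cases hlive : 0 < m.length ∧ m.getD 0 ' ' = c
    · obtain ⟨hlen0, hgc0⟩ := hlive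
      have ha1 : 1 ≤ lead c (m.drop 0) := by
        rw [drop_eq_cons m 0 hlen0, hgc0]; simp [lead]
      have hF1 : ∀ j, j ∈ (bstep m (m.length : Int) (PySem.Set.empty, PySem.Set.ofList [0]) c).1 ↔
          FB m 0 c 1 j := by
        intro j
        rw [mem_bstep_fst]
        constructor
        · rintro ⟨i, hm, hilt, hgci, rfl⟩
          have hi0 : i = 0 := by
            rcases hm with hm | hm
            · exact absurd hm (by simp [PySem.Set.empty])
            · rw [PySem.Set.mem_ofList] at hm; simpa using hm
          subst hi0
          exact ⟨1, le_refl _, ha1, le_refl _, by omega, by norm_num⟩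
        · rintro ⟨u, h1, h2, h3, h4, rfl⟩
          have hu : u = 1 := by omega
          subst hu
          refine ⟨0, Or.inr (by rw [PySem.Set.mem_ofList]; simp),
            by exact_mod_cast Int.ofNat_lt.mpr hlen0,
            by rw [PySem.List.pyGetD_zero]; exact hgc0, by norm_num⟩
      have hS1 : ∀ j, j ∉ (bstep m (m.length : Int) (PySem.Set.empty, PySem.Set.ofList [0]) c).2 := by
        intro j hj
        have := ((mem_bstep_snd m (m.length : Int) _ c j).1 hj).1
        exact absurd this (by simp [PySem.Set.empty])
      have hS1' : ∀ j, j ∈ (bstep m (m.length : Int) (PySem.Set.empty, PySem.Set.ofList [0]) c).2 ↔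
          SB m 0 c 1 j := by
        intro j
        constructor
        · intro hj; exact absurd hj (hS1 j)
        · rintro ⟨t, h1, h2, h3, h4, -⟩; omega
      rw [run_accept m h' 0 c 1 _ le_rfl hF1 hS1']
      conv_rhs => rw [show m = List.drop 0 m from List.drop_zero.symm]
      exact (go_cons m 0 c h' hlen0 hgc0).symm
    · have hF1e : ∀ j, j ∉ (bstep m (m.length : Int) (PySem.Set.empty, PySem.Set.ofList [0]) c).1 := by
        intro j hj
        rcases (mem_bstep_fst m (m.length : Int) _ c j).1 hj with ⟨i, hm, hilt, hgci, -⟩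
        have hi0 : i = 0 := by
          rcases hm with hm | hm
          · exact absurd hm (by simp [PySem.Set.empty])
          · rw [PySem.Set.mem_ofList] at hm; simpa using hm
        subst hi0
        have hlen0 : 0 < m.length := by exact_mod_cast hilt
        rw [PySem.List.pyGetD_zero] at hgci
        exact hlive ⟨hlen0, hgci⟩
      have hS1 : ∀ j, j ∉ (bstep m (m.length : Int) (PySem.Set.empty, PySem.Set.ofList [0]) c).2 := by
        intro j hj
        have := ((mem_bstep_snd m (m.length : Int) _ c j).1 hj).1
        exact absurd this (by simp [PySem.Set.empty])
      rw [dead_accept m h' _ hF1e hS1]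
      cases m with
      | nil => rw [go_nil_cons]
      | cons x xs =>
        have hx : ¬ x = c := by
          intro hxc
          exact hlive ⟨by simp, by simpa [List.getD] using hxc⟩
        rw [go, if_pos hx]

-- ===== VERDICT (by name: the statement is the Claim_ definition above) =====
theorem solve_spec : Claim_equal_solve := by
  intro matching heard _
  unfold Spec_solve
  have h1 : solve matching heard = go matching.toList heard.toList := by
    unfold solve; rw [go_eq]
  have h2 : solve_alt matching heard = go matching.toList heard.toList := by
    unfold solve_alt; exact alt_eq_go _ _
  rw [h1, h2]
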